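-- pv_equiv track=rewrite | github.com/Perfectionist-code/STEPIK_COURSES | Year course EGE 2026/3.6 (П) Домашнее задание 14.10 (№9 Либра)/3_6_4.py | cond_2
-- ===== SOURCE A (Python) =====
-- from itertools import permutations
--
-- def cond_2(l: list) -> bool:
--     l = sorted(l)[:4]
--     for per in permutations(l):
--         s1 = sum(per[:2])
--         s2 = sum(per[2:])
--         if s1 % 2 and s2 % 2:
--             return True
--     return False
-- ===== SOURCE B (Python) =====
-- def cond_2(l: list) -> bool:
--     # Take the 4 smallest elements and check the parity count directly:
--     # some split into two odd-sum groups exists iff at least 3 elements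
--     # were selected and exactly 2 of them are odd.
--     m = sorted(l)[:4]
--     return len(m) >= 3 and sum(x % 2 for x in m) == 2
-- ===== Notes on version B (the rewrite author's own statement) =====
-- stated objective: simpler
-- what changed: Replaces the 24-iteration permutation search over the 4 smallest elements by a direct parity count: return True iff at least 3 elements were selected and exactly 2 of them are odd.
import Mathlib
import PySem

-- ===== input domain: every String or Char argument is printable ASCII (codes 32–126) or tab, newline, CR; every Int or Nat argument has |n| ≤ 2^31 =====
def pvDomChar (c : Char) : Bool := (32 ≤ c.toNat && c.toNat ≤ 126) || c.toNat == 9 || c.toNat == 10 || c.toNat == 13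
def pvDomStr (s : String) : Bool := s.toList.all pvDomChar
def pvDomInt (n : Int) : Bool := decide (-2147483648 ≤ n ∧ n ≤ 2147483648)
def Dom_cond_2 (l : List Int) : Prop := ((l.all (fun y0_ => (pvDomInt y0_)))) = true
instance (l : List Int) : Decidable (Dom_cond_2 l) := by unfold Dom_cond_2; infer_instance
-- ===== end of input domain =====

-- B replaces A's permutation search over the 4 smallest elements by a direct parity count (objective: simpler).

-- ===== PORT A =====
-- l = sorted(l)[:4]; for per in permutations(l): if sum(per[:2]) % 2 and sum(per[2:]) % 2: return True; return False
def cond_2 (l : List Int) : Bool :=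
  let l4 := PySem.List.slice (PySem.List.sorted l (fun x => x)) none (some 4)
  (PySem.List.permutations l4 l4.length).any fun per =>
    (PySem.Int.mod (PySem.List.slice per none (some 2)).sum 2 != 0) &&
    (PySem.Int.mod (PySem.List.slice per (some 2) none).sum 2 != 0)

-- ===== PORT B =====
-- m = sorted(l)[:4]; return len(m) >= 3 and sum(x % 2 for x in m) == 2
def cond_2_alt (l : List Int) : Bool :=
  let m := PySem.List.slice (PySem.List.sorted l (fun x => x)) none (some 4)
  decide (3 ≤ m.length) && ((m.map fun x => PySem.Int.mod x 2).sum == 2)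

-- ===== PRECONDITION & SPEC =====
def Spec_cond_2 (l : List Int) (out : Bool) : Prop := out = cond_2_alt l
instance (l : List Int) (out : Bool) : Decidable (Spec_cond_2 l out) := by unfold Spec_cond_2; infer_instance

-- ===== CLAIM (what is proved, stated in full; the proofs are below) =====
def Claim_equal_cond_2 : Prop := ∀ (l : List Int), Dom_cond_2 l → Spec_cond_2 l (cond_2 l)

-- ===== LEMMAS AND PROOFS =====

lemma perms3_eq (a b c : Int) :
    PySem.List.permutations [a,b,c] 3 = [[a,b,c],[a,c,b],[b,a,c],[b,c,a],[c,a,b],[c,b,a]] := by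
  simp [PySem.List.permutations, List.range_succ]

lemma perms4_eq (a b c d : Int) :
    PySem.List.permutations [a,b,c,d] 4 = [[a,b,c,d],[a,b,d,c],[a,c,b,d],[a,c,d,b],[a,d,b,c],[a,d,c,b],[b,a,c,d],[b,a,d,c],[b,c,a,d],[b,c,d,a],[b,d,a,c],[b,d,c,a],[c,a,b,d],[c,a,d,b],[c,b,a,d],[c,b,d,a],[c,d,a,b],[c,d,b,a],[d,a,b,c],[d,a,c,b],[d,b,a,c],[d,b,c,a],[d,c,a,b],[d,c,b,a]] := by
  simp [PySem.List.permutations, List.range_succ]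

-- the core fact: on any list of ≤ 4 elements, A's permutation search equals B's parity count
lemma body_eq (m : List Int) (h : m.length ≤ 4) :
    ((PySem.List.permutations m m.length).any fun per =>
      (PySem.Int.mod (PySem.List.slice per none (some 2)).sum 2 != 0) &&
      (PySem.Int.mod (PySem.List.slice per (some 2) none).sum 2 != 0))
    = (decide (3 ≤ m.length) && ((m.map fun x => PySem.Int.mod x 2).sum == 2)) := by
  match m with
  | [] => decide
  | [a] =>
    simp [PySem.List.permutations, PySem.List.slice]
  | [a, b] =>
    simp [PySem.List.permutations, List.range_succ, PySem.List.slice]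
  | [a, b, c] =>
    rw [show ([a,b,c] : List Int).length = 3 from rfl, perms3_eq, Bool.eq_iff_iff]
    simp [PySem.List.slice]
    omega
  | [a, b, c, d] =>
    rw [show ([a,b,c,d] : List Int).length = 4 from rfl, perms4_eq, Bool.eq_iff_iff]
    simp [PySem.List.slice]
    omega
  | _ :: _ :: _ :: _ :: _ :: _ => exact absurd h (by simp)

lemma take4_len_le (l : List Int) :
    (PySem.List.slice (PySem.List.sorted l (fun x => x)) none (some 4)).length ≤ 4 := by
  simp [PySem.List.slice]

-- ===== VERDICT (by name: the statement is the Claim_ definition above) =====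
theorem cond_2_spec : Claim_equal_cond_2 := by
  intro l _
  unfold Spec_cond_2 cond_2 cond_2_alt
  exact body_eq _ (take4_len_le l)
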